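-- pv_equiv track=rewrite | github.com/tausackhn/twlived | twitch_video.py | _get_elements_after
-- ===== SOURCE A (Python) =====
-- from typing import Dict, List
--
-- def _get_elements_after(it: List, element=None) -> List:
--     if element:
--         _l = []
--         for element_ in reversed(it):
--             if element_ != element:
--                 _l.append(element_)
--             else:
--                 break
--         _l.reverse()
--         return _l
--     else:
--         return it
-- ===== SOURCE B (Python) =====
-- def _get_elements_after(it, element=None):
--     if element:
--         rev = it[::-1]
--         try:
--             j = rev.index(element)
--         except ValueError:
--             return it[:]
--         return it[len(it) - j:]
--     else:
--         return it
-- ===== Notes on version B (the rewrite author's own statement) =====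
-- stated objective: simpler
-- what changed: Replaces A's accumulate-backwards-with-break-then-reverse loop by locating the last occurrence with one index lookup on the reversed list and returning a slice (or a copy when absent).
import Mathlib
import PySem

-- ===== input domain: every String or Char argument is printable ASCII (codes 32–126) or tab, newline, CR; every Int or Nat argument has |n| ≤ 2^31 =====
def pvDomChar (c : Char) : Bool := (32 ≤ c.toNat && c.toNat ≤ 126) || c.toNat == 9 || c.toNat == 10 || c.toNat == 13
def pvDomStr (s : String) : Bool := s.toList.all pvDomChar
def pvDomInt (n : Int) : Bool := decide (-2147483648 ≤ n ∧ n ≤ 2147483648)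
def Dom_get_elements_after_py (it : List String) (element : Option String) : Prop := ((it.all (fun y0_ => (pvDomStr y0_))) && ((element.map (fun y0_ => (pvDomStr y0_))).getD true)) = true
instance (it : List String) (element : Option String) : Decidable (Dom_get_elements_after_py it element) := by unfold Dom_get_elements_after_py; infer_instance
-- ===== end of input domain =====

-- B finds the last occurrence via one reversed index lookup and returns a slice, instead of A's
-- accumulate-backwards-then-reverse loop; same cost, simpler. (Objective: simpler.)


-- ===== PORT A =====
-- the for-loop over reversed(it) with break, carrying the accumulator _l
def pvLoopA (e : String) (acc : List String) : List String → List String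
  | [] => acc
  | x :: xs => if x ≠ e then pvLoopA e (acc ++ [x]) xs else acc

def get_elements_after_py (it : List String) (element : Option String) : List String :=
  match element with
  | some e =>
      if e ≠ "" then
        (pvLoopA e [] it.reverse).reverse
      else it
  | none => it

-- ===== PORT B =====
def get_elements_after_py_alt (it : List String) (element : Option String) : List String :=
  match element with
  | some e =>
      if e ≠ "" then
        let rev := it.reverse                                   -- it[::-1]
        match PySem.List.index? rev e with
        | none => PySem.List.slice it none none                 -- it[:]
        | some j => PySem.List.slice it (some ((it.length : Int) - (j : Int))) none
      else it
  | none => it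

-- ===== PRECONDITION & SPEC =====
def Spec_get_elements_after_py (it : List String) (element : Option String) (out : List String) : Prop := out = get_elements_after_py_alt it element
instance (it : List String) (element : Option String) (out : List String) : Decidable (Spec_get_elements_after_py it element out) := by unfold Spec_get_elements_after_py; infer_instance

-- ===== CLAIM (what is proved, stated in full; the proofs are below) =====
def Claim_equal_get_elements_after_py : Prop := ∀ (it : List String) (element : Option String), Dom_get_elements_after_py it element → Spec_get_elements_after_py it element (get_elements_after_py it element)

-- ===== LEMMAS AND PROOFS =====
theorem pvLoopA_acc (e : String) (acc : List String) (l : List String) :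
    pvLoopA e acc l = acc ++ pvLoopA e [] l := by
  induction l generalizing acc with
  | nil => simp [pvLoopA]
  | cons x xs ih =>
      simp only [pvLoopA]
      by_cases h : x = e
      · simp [h]
      · rw [if_pos h, if_pos h, ih (acc ++ [x]), ih ([] ++ [x])]
        simp

theorem pvLoopA_eq_takeWhile (e : String) (l : List String) :
    pvLoopA e [] l = l.takeWhile (fun x => x ≠ e) := by
  induction l with
  | nil => simp [pvLoopA]
  | cons x xs ih =>
      simp only [pvLoopA, List.takeWhile_cons]
      by_cases h : x = e
      · simp [h]
      · rw [if_pos h, pvLoopA_acc, ih]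
        simp [h]

theorem takeWhile_of_not_mem (e : String) (l : List String) (h : e ∉ l) :
    l.takeWhile (fun x => x ≠ e) = l := by
  induction l with
  | nil => rfl
  | cons x xs ih =>
      simp only [List.mem_cons, not_or] at h
      rw [List.takeWhile_cons, if_pos (by simpa using Ne.symm h.1), ih h.2]

theorem takeWhile_append_elem (e : String) (pre suf : List String) (h : e ∉ pre) :
    (pre ++ e :: suf).takeWhile (fun x => x ≠ e) = pre := by
  induction pre with
  | nil => simp
  | cons x xs ih =>
      simp only [List.mem_cons, not_or] at h
      rw [List.cons_append, List.takeWhile_cons, if_pos (by simpa using Ne.symm h.1), ih h.2]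

theorem takeWhile_of_index? (e : String) (l : List String) (j : ℕ)
    (h : PySem.List.index? l e = some j) :
    l.takeWhile (fun x => x ≠ e) = l.take j := by
  obtain ⟨pre, suf, rfl, rfl, hpre⟩ := (PySem.List.index?_eq_some_iff _ _ _).1 h
  rw [takeWhile_append_elem e pre suf hpre, List.take_left']
  rfl

theorem get_elements_after_py_spec : Claim_equal_get_elements_after_py := by
  intro it element _
  unfold Spec_get_elements_after_py get_elements_after_py get_elements_after_py_alt
  cases element with
  | none => rfl
  | some e =>
      by_cases he : e = ""
      · simp [he]
      · simp only [he, ne_eq, not_false_iff, if_pos]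
        cases hidx : PySem.List.index? it.reverse e with
        | none =>
            have hnm : e ∉ it.reverse := (PySem.List.index?_eq_none_iff _ _).1 hidx
            rw [pvLoopA_eq_takeWhile, takeWhile_of_not_mem _ _ hnm,
              List.reverse_reverse, PySem.List.slice_none_none]
        | some j =>
            have hj : j < it.length := by
              obtain ⟨hk, -, -⟩ := PySem.List.getElem_of_index?_eq_some hidx
              simpa using hk
            rw [pvLoopA_eq_takeWhile, takeWhile_of_index? e _ j hidx]
            have hc : (it.length : Int) - (j : Int) = ((it.length - j : ℕ) : Int) := by
              omega
            dsimp only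
            rw [hc, PySem.List.slice_from_natCast]
            rw [List.take_reverse, List.reverse_reverse]
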